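-- pv_equiv track=rewrite | github.com/brianjaywoo/bmi_203_w2020_HW3 | smith_waterman/algs.py | alignment_string
-- ===== SOURCE A (Python) =====
-- def alignment_string(aligned_seq1, aligned_seq2):
--     '''Construct a special string showing identities, gaps, and mismatches.
--     This string is printed between the two aligned sequences and shows the
--     identities (|), gaps (-), and mismatches (:). As the string is constructed,
--     it also counts number of identities, gaps, and mismatches and returns the
--     counts along with the alignment string.
--     AAGGATGCCTCAAATCGATCT-TTTTCTTGG-
--     ::||::::::||:|::::::: |:  :||:|   <-- alignment string
--     CTGGTACTTGCAGAGAAGGGGGTA--ATTTGG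
--     '''
--     # Build the string as a list of characters to avoid costly string
--     # concatenation.
--
--     idents, gaps, mismatches = 0, 0, 0
--     alignment_string = []
--     #Consider cases in the aligned sequence:
--     for aa1, aa2 in zip(aligned_seq1, aligned_seq2):
--         #Perfect match
--         if aa1 == aa2:
--             alignment_string.append('|')
--             idents += 1
--         #This handles a gap.
--         elif '-' in (aa1, aa2):
--             alignment_string.append(' ')
--             gaps += 1
--         #This is the mismatch case.
--         else:
--             alignment_string.append(':')
--             mismatches += 1
--     #Return the joined alignment string.
--     return ''.join(alignment_string), idents, gaps, mismatches
-- ===== SOURCE B (Python) =====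
-- def alignment_string(aligned_seq1, aligned_seq2):
--     '''Staged construction: first a gap/mismatch mask over the overlap, then an
--     overwrite pass that promotes equal columns to '|'; counts come from scanning
--     the finished string.'''
--     n = min(len(aligned_seq1), len(aligned_seq2))
--     # stage 1: mark gap columns, everything else provisionally a mismatch
--     marks = [' ' if aligned_seq1[i] == '-' or aligned_seq2[i] == '-' else ':'
--              for i in range(n)]
--     # stage 2: identities override (note '-' vs '-' is an identity)
--     for i in range(n):
--         if aligned_seq1[i] == aligned_seq2[i]:
--             marks[i] = '|'
--     s = ''.join(marks)
--     return s, s.count('|'), s.count(' '), s.count(':')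
-- ===== Notes on version B (the rewrite author's own statement) =====
-- stated objective: alternative
-- what changed: B replaces A's single interleaved loop (three-way branch plus three counters) with staged passes over a mutable mark array: an index loop writes a gap/mismatch mask over the overlap, a second index loop overwrites equal columns with '|', and the three counts are read off the finished string with str.count.
import Mathlib
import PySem

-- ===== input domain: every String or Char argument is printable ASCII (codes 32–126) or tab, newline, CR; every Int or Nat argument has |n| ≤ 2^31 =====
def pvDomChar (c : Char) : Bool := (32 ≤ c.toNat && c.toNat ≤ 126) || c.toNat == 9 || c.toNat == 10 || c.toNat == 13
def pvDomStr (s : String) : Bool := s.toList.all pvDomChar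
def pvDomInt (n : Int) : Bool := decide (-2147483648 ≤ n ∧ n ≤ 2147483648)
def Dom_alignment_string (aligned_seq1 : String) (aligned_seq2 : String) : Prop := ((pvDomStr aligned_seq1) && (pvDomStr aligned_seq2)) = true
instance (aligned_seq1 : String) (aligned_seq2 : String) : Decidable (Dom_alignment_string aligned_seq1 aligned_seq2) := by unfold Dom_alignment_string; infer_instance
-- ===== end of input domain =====

-- B builds the marker string by staged passes (a gap/mismatch mask, then an overwrite
-- pass promoting equal columns to '|') and reads the three counts off the finished
-- string (objective: alternative).


-- ===== PORT A =====
-- one fold over the zipped pairs, maintaining the char list and the three counters together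
def alignment_string (aligned_seq1 : String) (aligned_seq2 : String) : String × Int × Int × Int :=
  let r := (aligned_seq1.toList.zip aligned_seq2.toList).foldl
    (fun (st : List Char × Int × Int × Int) p =>
      if p.1 == p.2 then (st.1 ++ ['|'], st.2.1 + 1, st.2.2.1, st.2.2.2)
      else if p.1 == '-' || p.2 == '-' then (st.1 ++ [' '], st.2.1, st.2.2.1 + 1, st.2.2.2)
      else (st.1 ++ [':'], st.2.1, st.2.2.1, st.2.2.2 + 1))
    ([], 0, 0, 0)
  (String.ofList r.1, r.2.1, r.2.2.1, r.2.2.2)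

-- ===== PORT B =====
-- stage 1: gap/mismatch mask over the overlap; stage 2: overwrite equal columns with '|';
-- counts read off the finished string
def alignment_string_alt (aligned_seq1 : String) (aligned_seq2 : String) : String × Int × Int × Int :=
  let l1 := aligned_seq1.toList
  let l2 := aligned_seq2.toList
  let n : Int := min (l1.length : Int) (l2.length : Int)
  let marks := (PySem.List.pyRange 0 n 1).map (fun i =>
      if PySem.List.pyGetD l1 i ' ' == '-' || PySem.List.pyGetD l2 i ' ' == '-' then ' ' else ':')
  -- indices from range(n) are nonnegative and in range, so 'marks[i] = ...' is set at i.toNat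
  let marks2 := (PySem.List.pyRange 0 n 1).foldl (fun m i =>
      if PySem.List.pyGetD l1 i ' ' == PySem.List.pyGetD l2 i ' ' then m.set i.toNat '|' else m) marks
  let s := String.ofList marks2
  (s, (PySem.Str.count s "|" : Int), (PySem.Str.count s " " : Int), (PySem.Str.count s ":" : Int))

-- ===== PRECONDITION & SPEC =====
def Spec_alignment_string (aligned_seq1 : String) (aligned_seq2 : String) (out : String × Int × Int × Int) : Prop := out = alignment_string_alt aligned_seq1 aligned_seq2
instance (aligned_seq1 : String) (aligned_seq2 : String) (out : String × Int × Int × Int) : Decidable (Spec_alignment_string aligned_seq1 aligned_seq2 out) := by unfold Spec_alignment_string; infer_instance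

-- ===== CLAIM (what is proved, stated in full; the proofs are below) =====
def Claim_equal_alignment_string : Prop := ∀ (aligned_seq1 : String) (aligned_seq2 : String), Dom_alignment_string aligned_seq1 aligned_seq2 → Spec_alignment_string aligned_seq1 aligned_seq2 (alignment_string aligned_seq1 aligned_seq2)

-- ===== LEMMAS AND PROOFS =====

-- the per-column marker, used only by the proofs to relate the two ports
def pvClassify (p : Char × Char) : Char :=
  if p.1 == p.2 then '|' else if p.1 == '-' || p.2 == '-' then ' ' else ':'

-- Python's s.count(c) for a single character is List.count on the code points
lemma countGo_single (c : Char) : ∀ (l : List Char) (fuel acc : Nat), l.length ≤ fuel →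
    PySem.Chars.count.go [c] fuel l acc = acc + l.count c := by
  intro l
  induction l with
  | nil => intro fuel acc _; cases fuel <;> simp [PySem.Chars.count.go]
  | cons h t ih =>
    intro fuel acc hf
    cases fuel with
    | zero => simp at hf
    | succ f =>
      rw [PySem.Chars.count.go]
      by_cases hc : c = h
      · subst hc
        simp only [List.isPrefixOf, List.drop, beq_self_eq_true, Bool.and_eq_true, and_true,
          List.length_cons, if_true, List.length_nil] at *
        rw [ih f (acc + 1) (Nat.succ_le_succ_iff.mp hf)]
        simp
        omega
      · have : ([c].isPrefixOf (h :: t)) = false := by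
          simp [List.isPrefixOf]; exact fun h' => (hc h')
        rw [this]
        simp only [Bool.false_eq_true, if_false]
        rw [ih f acc (Nat.succ_le_succ_iff.mp (by simpa using hf))]
        simp [List.count_cons]
        exact fun h' => hc h'.symm

lemma chars_count_single (s : List Char) (c : Char) : PySem.Chars.count s [c] = s.count c := by
  simp only [PySem.Chars.count, List.isEmpty_cons, Bool.false_eq_true, if_false]
  simpa using countGo_single c s s.length 0 le_rfl

-- fold invariant of A: the accumulated string is the mapped markers and
-- the counters are the counts of the three marker characters
lemma foldA_eq (l : List (Char × Char)) : ∀ (acc : List Char) (i g m : Int),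
    l.foldl
      (fun (st : List Char × Int × Int × Int) p =>
        if p.1 == p.2 then (st.1 ++ ['|'], st.2.1 + 1, st.2.2.1, st.2.2.2)
        else if p.1 == '-' || p.2 == '-' then (st.1 ++ [' '], st.2.1, st.2.2.1 + 1, st.2.2.2)
        else (st.1 ++ [':'], st.2.1, st.2.2.1, st.2.2.2 + 1))
      (acc, i, g, m)
    = (acc ++ l.map pvClassify,
       i + ((l.map pvClassify).count '|' : Int),
       g + ((l.map pvClassify).count ' ' : Int),
       m + ((l.map pvClassify).count ':' : Int)) := by
  induction l with
  | nil => intro acc i g m; simp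
  | cons p t ih =>
    intro acc i g m
    simp only [List.foldl_cons, List.map_cons]
    by_cases h1 : p.1 = p.2
    · rw [if_pos (by simpa using h1), ih]
      simp [pvClassify, h1]
      omega
    · rw [if_neg (by simpa using h1)]
      by_cases h2 : p.1 = '-' ∨ p.2 = '-'
      · rw [if_pos (by simpa using h2), ih]
        simp [pvClassify, h1, h2]
        omega
      · rw [if_neg (by simpa using h2), ih]
        simp [pvClassify, h1, h2]
        omega

-- B's stage-2 loop: a fold of conditional in-place sets over range(c) rewrites
-- exactly the positions j < c with p j to '|'
lemma fold_set_range (p : Nat → Bool) : ∀ (c : Nat) (m : List Char),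
    (List.range c).foldl (fun m k => if p k then m.set k '|' else m) m
      = m.mapIdx (fun j ch => if j < c ∧ p j = true then '|' else ch) := by
  intro c
  induction c with
  | zero =>
    intro m
    simp only [List.range_zero, List.foldl_nil]
    apply List.ext_getElem (by simp)
    intro j h1 h2
    simp
  | succ c ih =>
    intro m
    rw [List.range_succ, List.foldl_append, List.foldl_cons, List.foldl_nil, ih]
    by_cases hp : p c = true
    · rw [if_pos hp]
      apply List.ext_getElem (by simp)
      intro j h1 h2
      simp only [List.getElem_set, List.getElem_mapIdx]
      rcases eq_or_ne c j with rfl | hne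
      · simp [hp]
      · simp only [if_neg hne]
        have : (j < c ∧ p j = true) ↔ (j < c + 1 ∧ p j = true) := by
          constructor
          · rintro ⟨h, hq⟩; exact ⟨Nat.lt_succ_of_lt h, hq⟩
          · rintro ⟨h, hq⟩
            exact ⟨Nat.lt_of_le_of_ne (Nat.lt_succ_iff.mp h) (Ne.symm hne) , hq⟩
        simp [this]
    · rw [if_neg hp]
      apply List.ext_getElem (by simp)
      intro j h1 h2
      simp only [List.getElem_mapIdx]
      have : (j < c ∧ p j = true) ↔ (j < c + 1 ∧ p j = true) := by
        constructor
        · rintro ⟨h, hq⟩; exact ⟨Nat.lt_succ_of_lt h, hq⟩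
        · rintro ⟨h, hq⟩
          rcases Nat.lt_succ_iff_lt_or_eq.mp h with h' | rfl
          · exact ⟨h', hq⟩
          · exact absurd hq (by simpa using hp)
      simp [this]

-- B's whole mark construction equals the per-column classification of the zipped pairs
lemma marksB_eq (l1 l2 : List Char) :
    ((PySem.List.pyRange 0 (min (l1.length : Int) (l2.length : Int)) 1).foldl
      (fun m i =>
        if PySem.List.pyGetD l1 i ' ' == PySem.List.pyGetD l2 i ' ' then m.set i.toNat '|' else m)
      ((PySem.List.pyRange 0 (min (l1.length : Int) (l2.length : Int)) 1).map (fun i =>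
        if PySem.List.pyGetD l1 i ' ' == '-' || PySem.List.pyGetD l2 i ' ' == '-' then ' ' else ':')))
    = (l1.zip l2).map pvClassify := by
  set n := min l1.length l2.length with hn
  have hcast : min (l1.length : Int) (l2.length : Int) = (n : Int) := by
    simp [hn]
  rw [hcast, PySem.List.pyRange_zero_nat, List.foldl_map, List.map_map]
  have hget : ∀ (l : List Char) (k : Nat), PySem.List.pyGetD l (k : Int) ' ' = l.getD k ' ' := by
    intro l k; simp [PySem.List.pyGetD_natCast]
  have hstep : (fun (m : List Char) (k : Nat) =>
      if PySem.List.pyGetD l1 ((k : Int)) ' ' == PySem.List.pyGetD l2 ((k : Int)) ' '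
      then m.set ((k : Int)).toNat '|' else m)
      = fun m k => if (fun j => l1.getD j ' ' == l2.getD j ' ') k then m.set k '|' else m := by
    funext m k; simp [hget]
  rw [hstep, fold_set_range]
  apply List.ext_getElem
  · simp [hn]
  · intro j h1 h2
    have hj : j < n := by simpa [hn] using h1
    have hj1 : j < l1.length := lt_of_lt_of_le hj (by omega)
    have hj2 : j < l2.length := lt_of_lt_of_le hj (by omega)
    simp only [List.getElem_mapIdx, List.getElem_map, List.getElem_range, List.getElem_zip]
    have g1 : l1.getD j ' ' = l1[j] := List.getD_eq_getElem l1 ' ' hj1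
    have g2 : l2.getD j ' ' = l2[j] := List.getD_eq_getElem l2 ' ' hj2
    have hgj : ∀ (l : List Char), PySem.List.pyGetD l ((j : Int)) ' ' = l.getD j ' ' := fun l => hget l j
    simp only [g1, g2, hj, true_and, pvClassify]
    by_cases he : l1[j] = l2[j]
    · simp [he]
    · simp [he, List.getElem?_eq_getElem hj1, List.getElem?_eq_getElem hj2]

-- ===== VERDICT (by name: the statement is the Claim_ definition above) =====
theorem alignment_string_spec : Claim_equal_alignment_string := by
  intro s1 s2 _
  unfold Spec_alignment_string alignment_string alignment_string_alt
  dsimp only []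
  rw [foldA_eq]
  rw [marksB_eq s1.toList s2.toList]
  simp [PySem.Str.count, chars_count_single]
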